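-- pv_equiv track=rewrite | github.com/JMSC11/Advent-of-code | 2022/day5/day5.py | extract_movements_and_stacks
-- ===== SOURCE A (Python) =====
-- def extract_movements_and_stacks(lines):
--     movements = []
--     movements_start = False
--     stacks = []
--
--     for crates in lines:
--         if not crates.replace(" ", "").strip():
--             movements_start = True
--             continue
--         if not movements_start:
--             stacks.append(crates)
--         else:
--             movements.append(crates)
--
--     return movements, stacks
-- ===== SOURCE B (Python) =====
-- def _blank(line):
--     return not line.replace(" ", "").strip()
--
--
-- def extract_movements_and_stacks(lines):
--     idx = next((i for i, line in enumerate(lines) if _blank(line)), len(lines))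
--     stacks = lines[:idx]
--     movements = [line for line in lines[idx + 1:] if not _blank(line)]
--     return movements, stacks
-- ===== Notes on version B (the rewrite author's own statement) =====
-- stated objective: simpler
-- what changed: Replaces the flag-carrying accumulator loop by locating the first blank line once and slicing: stacks = lines before it, movements = non-blank lines after it.
import Mathlib
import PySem

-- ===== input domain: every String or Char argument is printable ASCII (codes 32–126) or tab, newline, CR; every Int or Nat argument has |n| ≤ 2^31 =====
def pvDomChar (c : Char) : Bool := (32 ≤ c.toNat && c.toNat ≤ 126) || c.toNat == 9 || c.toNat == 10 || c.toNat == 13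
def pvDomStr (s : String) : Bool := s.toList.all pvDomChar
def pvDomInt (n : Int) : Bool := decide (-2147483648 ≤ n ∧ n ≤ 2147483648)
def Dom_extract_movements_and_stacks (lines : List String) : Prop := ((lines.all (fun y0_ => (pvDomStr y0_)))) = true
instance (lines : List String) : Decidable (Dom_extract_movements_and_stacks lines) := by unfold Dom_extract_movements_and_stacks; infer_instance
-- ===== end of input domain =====

-- B replaces A's flag-carrying accumulator loop by locating the first blank line once and slicing (simpler decomposition, same O(n) cost).

-- ===== PORT A =====
-- 'not crates.replace(" ", "").strip()' — the shared blank-line test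
def pvBlank (s : String) : Bool := PySem.Str.strip (PySem.Str.replace s " " "") == ""

-- the for-loop of A, state = (movements, movements_start, stacks-list)
def extract_loopA (rest : List String) (movements : List String) (movements_start : Bool)
    (stks : List String) : List String × List String :=
  match rest with
  | [] => (movements, stks)
  | crates :: rest =>
    if pvBlank crates then extract_loopA rest movements true stks
    else if !movements_start then extract_loopA rest movements movements_start (stks ++ [crates])
    else extract_loopA rest (movements ++ [crates]) movements_start stks

def extract_movements_and_stacks (lines : List String) : List String × List String :=
  extract_loopA lines [] false []

-- ===== PORT B =====
def extract_movements_and_stacks_alt (lines : List String) : List String × List String :=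
  let idx := match lines.findIdx? (fun l => pvBlank l) with
    | some i => i
    | none => lines.length
  let stks := lines.take idx
  let movements := (lines.drop (idx + 1)).filter (fun l => !pvBlank l)
  (movements, stks)

-- ===== PRECONDITION & SPEC =====
def Spec_extract_movements_and_stacks (lines : List String) (out : List String × List String) : Prop := out = extract_movements_and_stacks_alt lines
instance (lines : List String) (out : List String × List String) : Decidable (Spec_extract_movements_and_stacks lines out) := by unfold Spec_extract_movements_and_stacks; infer_instance

-- ===== CLAIM (what is proved, stated in full; the proofs are below) =====
def Claim_equal_extract_movements_and_stacks : Prop := ∀ (lines : List String), Dom_extract_movements_and_stacks lines → Spec_extract_movements_and_stacks lines (extract_movements_and_stacks lines)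

-- ===== LEMMAS AND PROOFS =====

-- once the flag is set, the loop just filters the rest into movements
theorem extract_loopA_true (rest movements stks : List String) :
    extract_loopA rest movements true stks
      = (movements ++ rest.filter (fun l => !pvBlank l), stks) := by
  induction rest generalizing movements with
  | nil => simp [extract_loopA]
  | cons c r ih =>
    by_cases h : pvBlank c = true
    · simp [extract_loopA, h, ih]
    · simp only [Bool.not_eq_true] at h
      simp [extract_loopA, h, ih]

-- before the flag is set, the loop computes B's slice-based decomposition
theorem extract_loopA_false (rest movements stks : List String) :
    extract_loopA rest movements false stks
      = (movements ++ (rest.drop ((match rest.findIdx? (fun l => pvBlank l) with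
            | some i => i | none => rest.length) + 1)).filter (fun l => !pvBlank l),
         stks ++ rest.take (match rest.findIdx? (fun l => pvBlank l) with
            | some i => i | none => rest.length)) := by
  induction rest generalizing stks with
  | nil => simp [extract_loopA]
  | cons c r ih =>
    by_cases h : pvBlank c = true
    · simp [extract_loopA, h, List.findIdx?_cons, extract_loopA_true]
    · simp only [Bool.not_eq_true] at h
      rw [extract_loopA]
      simp only [h, Bool.false_eq_true, if_false, Bool.not_false, if_true, ih,
        List.findIdx?_cons, Bool.false_eq_true, if_false]
      cases hF : r.findIdx? (fun l => pvBlank l) with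
      | none => simp [List.append_assoc]
      | some i => simp [List.append_assoc]

-- ===== VERDICT (by name: the statement is the Claim_ definition above) =====
theorem extract_movements_and_stacks_spec : Claim_equal_extract_movements_and_stacks := by
  intro lines _
  show _ = _
  rw [extract_movements_and_stacks, extract_loopA_false]
  simp [extract_movements_and_stacks_alt]
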